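-- pv_equiv track=rewrite | github.com/thanasispetropoulos/Composed_IR_Searle | utils.py | split_string_into_n_strings
-- ===== SOURCE A (Python) =====
-- def split_string_into_n_strings(original_string, n):
--     words = original_string.split()
--     total_words = len(words)
--
--     if n <= 0:
--         raise ValueError("Number of strings must be greater than zero.")
--
--     words_per_string = total_words // n
--     remainder_words = total_words % n
--
--     split_strings = []
--     start_index = 0
--
--     for i in range(n):
--         end_index = start_index + words_per_string
--         if remainder_words > 0:
--             end_index += 1
--             remainder_words -= 1
--
--         split_strings.append(' '.join(words[start_index:end_index]))
--         start_index = end_index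
--
--     return split_strings
-- ===== SOURCE B (Python) =====
-- def split_string_into_n_strings(original_string, n):
--     if n <= 0:
--         raise ValueError("Number of strings must be greater than zero.")
--     words = original_string.split()
--     q, r = divmod(len(words), n)
--     big = r * (q + 1)
--
--     buckets = [[] for _ in range(n)]
--     for j, w in enumerate(words):
--         g = j // (q + 1) if j < big else r + (j - big) // q
--         buckets[g].append(w)
--     return [' '.join(b) for b in buckets]
-- ===== Notes on version B (the rewrite author's own statement) =====
-- stated objective: alternative
-- what changed: B inverts the traversal: instead of slicing out each of the n groups with a running start index, it makes one pass over the words, computes each word's group index from a closed-form inverse of the boundary function, deals the word into that bucket, and joins the buckets at the end.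
import Mathlib
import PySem

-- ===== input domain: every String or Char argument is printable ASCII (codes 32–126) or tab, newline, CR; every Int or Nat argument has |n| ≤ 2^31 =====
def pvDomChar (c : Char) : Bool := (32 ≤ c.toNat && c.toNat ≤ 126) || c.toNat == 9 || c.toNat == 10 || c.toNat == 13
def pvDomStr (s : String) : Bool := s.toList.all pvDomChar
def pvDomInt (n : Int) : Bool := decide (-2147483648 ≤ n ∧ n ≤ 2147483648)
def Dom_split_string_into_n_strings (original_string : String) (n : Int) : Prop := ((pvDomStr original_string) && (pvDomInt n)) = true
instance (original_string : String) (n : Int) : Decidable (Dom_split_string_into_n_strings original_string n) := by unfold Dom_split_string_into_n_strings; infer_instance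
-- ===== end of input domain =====

-- B inverts A's traversal: one pass over the words dealing each word into its bucket by a
-- closed-form group index, instead of slicing out the n groups with a running start index
-- (objective: alternative).

-- ===== PORT A =====
-- the loop body of A's for-loop: state = (split_strings, start_index, remainder_words)
def pvStepA (words : List String) (words_per_string : Int)
    (st : List String × Int × Int) (_ : Int) : List String × Int × Int :=
  let e0 := st.2.1 + words_per_string
  let er := if st.2.2 > 0 then (e0 + 1, st.2.2 - 1) else (e0, st.2.2)
  (st.1 ++ [PySem.Str.join " " (PySem.List.slice words (some st.2.1) (some er.1))], er.1, er.2)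

def split_string_into_n_strings (original_string : String) (n : Int) : List String :=
  let words := PySem.Str.split₀ original_string
  let total : Int := (words.length : Int)
  let words_per_string := PySem.Int.floordiv total n
  let remainder_words := PySem.Int.mod total n
  ((PySem.List.pyRange 0 n 1).foldl (pvStepA words words_per_string)
    ([], 0, remainder_words)).1

-- ===== PORT B =====
-- the group index of word j: first r groups have q+1 words, the rest have q
def pvGroup (q r j : Int) : Int :=
  if j < r * (q + 1) then PySem.Int.floordiv j (q + 1)
  else r + PySem.Int.floordiv (j - r * (q + 1)) q

def split_string_into_n_strings_alt (original_string : String) (n : Int) : List String :=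
  let words := PySem.Str.split₀ original_string
  let total : Int := (words.length : Int)
  let q := PySem.Int.floordiv total n
  let r := PySem.Int.mod total n
  let buckets0 : List (List String) := (PySem.List.pyRange 0 n 1).map (fun _ => [])
  let buckets := (PySem.List.enumerate words).foldl
    (fun bs p => bs.modify (pvGroup q r p.1).toNat (· ++ [p.2])) buckets0
  buckets.map (fun b => PySem.Str.join " " b)

-- ===== PRECONDITION & SPEC =====
-- Pre_ excludes exactly n ≤ 0, where the Python A raises ValueError (B raises too).
def Pre_split_string_into_n_strings (_original_string : String) (n : Int) : Prop := 1 ≤ n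
instance (original_string : String) (n : Int) : Decidable (Pre_split_string_into_n_strings original_string n) := by unfold Pre_split_string_into_n_strings; infer_instance

def pvWitness_split_string_into_n_strings : String × Int := ("a b c", 2)

def Spec_split_string_into_n_strings (original_string : String) (n : Int) (out : List String) : Prop := out = split_string_into_n_strings_alt original_string n
instance (original_string : String) (n : Int) (out : List String) : Decidable (Spec_split_string_into_n_strings original_string n out) := by unfold Spec_split_string_into_n_strings; infer_instance

-- ===== CLAIM (what is proved, stated in full; the proofs are below) =====
def Claim_equal_split_string_into_n_strings : Prop := ∀ (original_string : String) (n : Int), Dom_split_string_into_n_strings original_string n → Pre_split_string_into_n_strings original_string n → Spec_split_string_into_n_strings original_string n (split_string_into_n_strings original_string n)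

-- ===== LEMMAS AND PROOFS =====

-- the closed-form group boundary both sides are proved to realise
def pvBound (q r i : Int) : Int := i * q + min i r

lemma pvBound_succ (q r k : Int) :
    pvBound q r (k + 1) =
      pvBound q r k + q + (if r - min k r > 0 then 1 else 0) := by
  simp only [pvBound]
  have h1 : (k + 1) * q = k * q + q := by ring
  rw [h1]
  generalize k * q = a
  split_ifs with h <;> omega

lemma pvRem_succ (r k : Int) :
    r - min (k + 1) r =
      (if r - min k r > 0 then (r - min k r) - 1 else r - min k r) := by
  split_ifs with h <;> omega

-- A's loop unrolled: the running start index is the closed-form boundary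
lemma pv_loop (words : List String) (q r : Int) :
    ∀ (m : Nat) (k : Int) (acc : List String),
    (PySem.List.pyRange k (k + (m : Int)) 1).foldl (pvStepA words q)
        (acc, pvBound q r k, r - min k r)
      = (acc ++ (PySem.List.pyRange k (k + (m : Int)) 1).map (fun i =>
            PySem.Str.join " " (PySem.List.slice words (some (pvBound q r i))
              (some (pvBound q r (i + 1))))),
         pvBound q r (k + (m : Int)), r - min (k + (m : Int)) r) := by
  intro m
  induction m with
  | zero =>
    intro k acc
    simp [PySem.List.pyRange_one_eq_nil (le_refl k)]
  | succ m ih =>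
    intro k acc
    have hlt : k < k + ((m + 1 : Nat) : Int) := by push_cast; omega
    rw [PySem.List.pyRange_one_cons hlt]
    simp only [List.foldl_cons, List.map_cons]
    have hstep : pvStepA words q (acc, pvBound q r k, r - min k r) k =
        (acc ++ [PySem.Str.join " " (PySem.List.slice words (some (pvBound q r k))
            (some (pvBound q r (k + 1))))],
         pvBound q r (k + 1), r - min (k + 1) r) := by
      simp only [pvStepA, pvBound_succ q r k, pvRem_succ r k]
      split_ifs with h <;> simp
    rw [hstep]
    have hsh : k + ((m + 1 : Nat) : Int) = (k + 1) + (m : Int) := by push_cast; ring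
    rw [hsh, ih (k + 1) _]
    simp

-- B's fold of modify, read off pointwise: bucket i collects exactly the words assigned to i
lemma pv_foldl_modify {α : Type} (idx : Int → Nat) :
    ∀ (ps : List (Int × α)) (bs : List (List α)) (i : Nat),
    (ps.foldl (fun bs p => bs.modify (idx p.1) (· ++ [p.2])) bs)[i]? =
      bs[i]?.map (fun b => b ++ (ps.filter (fun p => idx p.1 == i)).map Prod.snd) := by
  intro ps
  induction ps with
  | nil => intro bs i; simp
  | cons p ps ih =>
    intro bs i
    simp only [List.foldl_cons, ih, List.getElem?_modify, List.filter_cons]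
    cases hbi : bs[i]? with
    | none => simp [hbi]
    | some b => by_cases h : idx p.1 = i <;> simp [hbi, h]

-- a range filtered to a subinterval is the subrange
lemma pv_filter_pyRange (a b L : Int) (h0 : 0 ≤ a) (hab : a ≤ b) (hbL : b ≤ L) :
    (PySem.List.pyRange 0 L 1).filter (fun j => decide (a ≤ j) && decide (j < b))
      = PySem.List.pyRange a b 1 := by
  rw [PySem.List.pyRange_one_append 0 a L h0 (le_trans hab hbL),
      PySem.List.pyRange_one_append a b L hab hbL,
      List.filter_append, List.filter_append]
  have hpre : (PySem.List.pyRange 0 a 1).filter (fun j => decide (a ≤ j) && decide (j < b)) = [] := by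
    rw [List.filter_eq_nil_iff]
    intro x hx
    rw [PySem.List.mem_pyRange_one] at hx
    simp; omega
  have hmid : (PySem.List.pyRange a b 1).filter (fun j => decide (a ≤ j) && decide (j < b))
      = PySem.List.pyRange a b 1 := by
    rw [List.filter_eq_self]
    intro x hx
    rw [PySem.List.mem_pyRange_one] at hx
    simp; omega
  have hsuf : (PySem.List.pyRange b L 1).filter (fun j => decide (a ≤ j) && decide (j < b)) = [] := by
    rw [List.filter_eq_nil_iff]
    intro x hx
    rw [PySem.List.mem_pyRange_one] at hx
    simp; omega
  rw [hpre, hmid, hsuf, List.nil_append, List.append_nil]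

-- mapping xs[j] over a subrange is the slice
lemma pv_map_pyGetD_slice (xs : List String) (a b : Int)
    (ha : 0 ≤ a) (hab : a ≤ b) (hb : b ≤ (xs.length : Int)) :
    (PySem.List.pyRange a b 1).map (fun j => PySem.List.pyGetD xs j "")
      = PySem.List.slice xs (some a) (some b) := by
  have hsplit := PySem.List.pyRange_one_append a b ((xs.length : Int)) hab hb
  have hall : (PySem.List.pyRange a (PySem.List.len xs) 1).map (fun j => PySem.List.pyGetD xs j "")
      = xs.drop a.toNat := PySem.List.map_pyGetD_pyRange xs "" ha
  rw [show PySem.List.len xs = (xs.length : Int) from rfl] at hall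
  rw [hsplit, List.map_append] at hall
  have hlen : ((PySem.List.pyRange a b 1).map (fun j => PySem.List.pyGetD xs j "")).length
      = (b - a).toNat := by
    rw [List.length_map, PySem.List.length_pyRange_one]
  have := congrArg (List.take (b - a).toNat) hall
  rw [List.take_append_of_le_length (by omega), ← hlen, List.take_length] at this
  rw [this, PySem.List.slice_toNat xs ha (le_trans ha hab)]
  congr 1
  omega

-- pvGroup is the inverse of pvBound: word j lies in group i iff bound i ≤ j < bound (i+1)
lemma pv_group_iff (T n q r : Int) (hn : 0 < n)
    (hq : q = PySem.Int.floordiv T n) (hr : r = PySem.Int.mod T n)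
    (j : Int) (hj : 0 ≤ j) (hjT : j < T) (i : Int) (hi : 0 ≤ i) (_hin : i < n) :
    pvGroup q r j = i ↔ (pvBound q r i ≤ j ∧ j < pvBound q r (i + 1)) := by
  have hr0 : 0 ≤ r := hr ▸ PySem.Int.mod_nonneg T hn
  have hrn : r < n := hr ▸ PySem.Int.mod_lt T hn
  have hT : q * n + r = T := by rw [hq, hr]; exact PySem.Int.floordiv_mul_add_mod T n
  have hq0 : 0 ≤ q := by
    rw [hq, PySem.Int.le_floordiv_iff_mul_le hn]
    nlinarith
  constructor
  · intro hg
    unfold pvGroup at hg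
    by_cases hlt : j < r * (q + 1)
    · rw [if_pos hlt] at hg
      have hb := (PySem.Int.floordiv_eq_iff_of_pos (by omega : (0:Int) < q + 1)).mp hg
      have hir : i < r := by nlinarith [hb.1]
      have hmin1 : min i r = i := by omega
      have hmin2 : min (i + 1) r = i + 1 := by omega
      simp only [pvBound, hmin1, hmin2]
      constructor <;> nlinarith [hb.1, hb.2]
    · rw [if_neg hlt] at hg
      push_neg at hlt
      have hqpos : 0 < q := by
        rcases lt_or_eq_of_le hq0 with h | h
        · exact h
        · exfalso; rw [← h] at hT; nlinarith
      have hfd : PySem.Int.floordiv (j - r * (q + 1)) q = i - r := by omega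
      have hb := (PySem.Int.floordiv_eq_iff_of_pos hqpos).mp hfd
      have hri : r ≤ i := by
        have h0 : 0 ≤ PySem.Int.floordiv (j - r * (q + 1)) q := by
          rw [PySem.Int.le_floordiv_iff_mul_le hqpos]; nlinarith
        omega
      have hmin1 : min i r = r := by omega
      have hmin2 : min (i + 1) r = r := by omega
      simp only [pvBound, hmin1, hmin2]
      constructor <;> nlinarith [hb.1, hb.2]
  · rintro ⟨h1, h2⟩
    unfold pvGroup
    by_cases hlt : j < r * (q + 1)
    · rw [if_pos hlt]
      have hir : i < r := by
        by_contra hc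
        push_neg at hc
        have hmin1 : min i r = r := by omega
        have hbb : r * (q + 1) ≤ pvBound q r i := by
          simp only [pvBound, hmin1]; nlinarith
        omega
      have hmin1 : min i r = i := by omega
      have hmin2 : min (i + 1) r = i + 1 := by omega
      simp only [pvBound, hmin1, hmin2] at h1 h2
      rw [PySem.Int.floordiv_eq_iff_of_pos (by omega : (0:Int) < q + 1)]
      constructor <;> nlinarith
    · rw [if_neg hlt]
      push_neg at hlt
      have hqpos : 0 < q := by
        rcases lt_or_eq_of_le hq0 with h | h
        · exact h
        · exfalso; rw [← h] at hT; nlinarith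
      have hri : r ≤ i := by
        by_contra hc
        push_neg at hc
        have hmin2 : min (i + 1) r = i + 1 := by omega
        have hbb : pvBound q r (i + 1) ≤ r * (q + 1) := by
          simp only [pvBound, hmin2]; nlinarith
        omega
      have hmin1 : min i r = r := by omega
      have hmin2 : min (i + 1) r = r := by omega
      simp only [pvBound, hmin1, hmin2] at h1 h2
      have hfd : PySem.Int.floordiv (j - r * (q + 1)) q = i - r := by
        rw [PySem.Int.floordiv_eq_iff_of_pos hqpos]
        constructor <;> nlinarith
      omega

-- the group index is nonnegative for a word index 0 ≤ j < T
lemma pv_group_nonneg (T n q r : Int) (hn : 0 < n)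
    (hq : q = PySem.Int.floordiv T n) (hr : r = PySem.Int.mod T n)
    (j : Int) (hj : 0 ≤ j) (hjT : j < T) : 0 ≤ pvGroup q r j := by
  have hr0 : 0 ≤ r := hr ▸ PySem.Int.mod_nonneg T hn
  have hT : q * n + r = T := by rw [hq, hr]; exact PySem.Int.floordiv_mul_add_mod T n
  have hq0 : 0 ≤ q := by
    rw [hq, PySem.Int.le_floordiv_iff_mul_le hn]
    nlinarith
  unfold pvGroup
  by_cases hlt : j < r * (q + 1)
  · rw [if_pos hlt]
    rw [PySem.Int.le_floordiv_iff_mul_le (by omega : (0:Int) < q + 1)]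
    nlinarith
  · rw [if_neg hlt]
    push_neg at hlt
    have hqpos : 0 < q := by
      rcases lt_or_eq_of_le hq0 with h | h
      · exact h
      · exfalso; rw [← h] at hT; nlinarith
    have h0 : 0 ≤ PySem.Int.floordiv (j - r * (q + 1)) q := by
      rw [PySem.Int.le_floordiv_iff_mul_le hqpos]; nlinarith
    omega

-- 0 ≤ bound i ≤ bound (i+1) ≤ T for 0 ≤ i < n
lemma pv_bound_facts (T n q r : Int) (hn : 0 < n) (hT0 : 0 ≤ T)
    (hq : q = PySem.Int.floordiv T n) (hr : r = PySem.Int.mod T n)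
    (i : Int) (hi : 0 ≤ i) (hin : i < n) :
    0 ≤ pvBound q r i ∧ pvBound q r i ≤ pvBound q r (i + 1) ∧ pvBound q r (i + 1) ≤ T := by
  have hr0 : 0 ≤ r := hr ▸ PySem.Int.mod_nonneg T hn
  have hrn : r < n := hr ▸ PySem.Int.mod_lt T hn
  have hT : q * n + r = T := by rw [hq, hr]; exact PySem.Int.floordiv_mul_add_mod T n
  have hq0 : 0 ≤ q := by
    rw [hq, PySem.Int.le_floordiv_iff_mul_le hn]
    nlinarith
  simp only [pvBound]
  refine ⟨by nlinarith [le_min hi hr0, mul_nonneg hi hq0], ?_, ?_⟩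
  · nlinarith [min_le_min (by omega : i ≤ i + 1) (le_refl r), mul_nonneg hi hq0]
  · nlinarith [min_le_right (i + 1) r,
      mul_le_mul_of_nonneg_right (by omega : i + 1 ≤ n) hq0]

-- ===== VERDICT (by name: the statement is the Claim_ definition above) =====
theorem split_string_into_n_strings_spec : Claim_equal_split_string_into_n_strings := by
  unfold Claim_equal_split_string_into_n_strings
  intro s n _ hpre
  unfold Pre_split_string_into_n_strings at hpre
  have hn : (0:Int) < n := by omega
  unfold Spec_split_string_into_n_strings
  simp only [split_string_into_n_strings, split_string_into_n_strings_alt]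
  set words := PySem.Str.split₀ s with hw
  set q := PySem.Int.floordiv ((words.length : Int)) n with hqdef
  set r := PySem.Int.mod ((words.length : Int)) n with hrdef
  have hT0 : (0:Int) ≤ ((words.length : Int)) := by positivity
  have hr0 : 0 ≤ r := hrdef ▸ PySem.Int.mod_nonneg _ hn
  -- A's loop is the closed-form boundary map
  have hn0 : ((n.toNat : Int)) = n := Int.toNat_of_nonneg (by omega)
  have hb0 : pvBound q r 0 = 0 := by simp [pvBound]; omega
  have hloop := pv_loop words q r n.toNat 0 []
  rw [hn0, hb0] at hloop
  have hinit : r = r - min 0 r := by omega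
  rw [show (0:Int) + n = n by ring] at hloop
  have hA : ((PySem.List.pyRange 0 n 1).foldl (pvStepA words q) ([], 0, r)).1
      = (PySem.List.pyRange 0 n 1).map (fun i =>
          PySem.Str.join " " (PySem.List.slice words (some (pvBound q r i))
            (some (pvBound q r (i + 1))))) := by
    calc ((PySem.List.pyRange 0 n 1).foldl (pvStepA words q) ([], 0, r)).1
        = ((PySem.List.pyRange 0 n 1).foldl (pvStepA words q) ([], 0, r - min 0 r)).1 := by
          rw [← hinit]
      _ = (PySem.List.pyRange 0 n 1).map (fun i =>
            PySem.Str.join " " (PySem.List.slice words (some (pvBound q r i))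
              (some (pvBound q r (i + 1))))) := by rw [hloop]; simp
  -- B's buckets are exactly the slices, read off index by index
  have hbuckets :
      ((PySem.List.enumerate words).foldl
          (fun bs p => bs.modify (pvGroup q r p.1).toNat (· ++ [p.2]))
          ((PySem.List.pyRange 0 n 1).map (fun _ => ([] : List String))))
        = (PySem.List.pyRange 0 n 1).map
            (fun i => PySem.List.slice words (some (pvBound q r i)) (some (pvBound q r (i + 1)))) := by
    apply List.ext_getElem?
    intro i
    rw [pv_foldl_modify (fun z => (pvGroup q r z).toNat)]
    rw [List.getElem?_map, List.getElem?_map, PySem.List.getElem?_pyRange_one]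
    by_cases hilt : i < (n - 0).toNat
    · rw [if_pos hilt]
      simp only [Option.map_some, zero_add]
      rw [Option.some.injEq, List.nil_append]
      have hiI0 : (0:Int) ≤ (i:Int) := by positivity
      have hiIn : ((i:Int)) < n := by omega
      have hbf := pv_bound_facts ((words.length:Int)) n q r hn hT0 hqdef hrdef (i:Int) hiI0 hiIn
      have hcong : ∀ j ∈ PySem.List.pyRange 0 ((words.length:Int)) 1,
          ((pvGroup q r j).toNat == i)
            = (decide (pvBound q r (i:Int) ≤ j) && decide (j < pvBound q r ((i:Int) + 1))) := by
        intro j hj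
        rw [PySem.List.mem_pyRange_one] at hj
        have hnn := pv_group_nonneg ((words.length:Int)) n q r hn hqdef hrdef j hj.1 hj.2
        by_cases hgi : pvGroup q r j = (i:Int)
        · have h1 : ((pvGroup q r j).toNat == i) = true := by simp; omega
          have hiv := (pv_group_iff ((words.length:Int)) n q r hn hqdef hrdef j hj.1 hj.2
            (i:Int) hiI0 hiIn).mp hgi
          rw [h1]
          simp [hiv.1, hiv.2]
        · have h1 : ((pvGroup q r j).toNat == i) = false := by simp; omega
          have hiv : ¬ (pvBound q r (i:Int) ≤ j ∧ j < pvBound q r ((i:Int) + 1)) := fun hh =>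
            hgi ((pv_group_iff ((words.length:Int)) n q r hn hqdef hrdef j hj.1 hj.2
              (i:Int) hiI0 hiIn).mpr hh)
          rw [h1]
          by_cases ha : pvBound q r (i:Int) ≤ j
          · by_cases hb2 : j < pvBound q r ((i:Int) + 1)
            · exact (hiv ⟨ha, hb2⟩).elim
            · simp [ha, hb2]
          · simp [ha]
      rw [show PySem.List.enumerate words
            = (PySem.List.pyRange 0 ((words.length:Int)) 1).map
                (fun j => (j, PySem.List.pyGetD words j ""))
          from PySem.List.enumerate_eq_map_pyRange words ""]
      rw [List.filter_map, List.map_map]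
      simp only [Function.comp_def]
      rw [List.filter_congr hcong]
      rw [pv_filter_pyRange _ _ _ hbf.1 hbf.2.1 hbf.2.2]
      rw [pv_map_pyGetD_slice words _ _ hbf.1 hbf.2.1 hbf.2.2]
    · rw [if_neg hilt]
      simp
  rw [hA, hbuckets, List.map_map]
  simp [Function.comp_def]
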